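-- pv_equiv track=rewrite | github.com/Suk1412/NexlifyAPP | weave/tools.py | landmine
-- ===== SOURCE A (Python) =====
-- def can_cover(A, B):
--     """与布防图比较，判断安全区是否可以覆盖"""
--     A_sorted = sorted(A, reverse=True)
--     B_sorted = sorted(B, reverse=True)
--     used = [False] * len(A_sorted)
--     for b in B_sorted:
--         found = False
--         for i, a in enumerate(A_sorted):
--             if not used[i] and a >= b:
--                 used[i] = True
--                 found = True
--                 break
--         if not found:
--             return False
--     return True
--
-- def is_same_segment(lst):
--      """找出所有安全区"""
--      segments = []
--      in_segment = False
--      start = None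
--      info = {}
--      for idx, item in enumerate(lst):
--           if item == 1:
--                if not in_segment:
--                     start = idx
--                     in_segment = True
--           else:
--                if in_segment:
--                     segments.append((start, idx - 1))
--                     in_segment = False
--      if in_segment:
--           segments.append((start, len(lst) - 1))
--      for i, (start, end) in enumerate(segments, 1):
--           info[i] = end - start + 1
--      return info
--
-- def temporarily_set(lst, idx, value, func):
--     """在安全区两边 依次踩踏 如果爆炸就记录"""
--     original = lst[idx]
--     lst[idx] = value
--     ind = func()  # 执行中间逻辑
--     lst[idx] = original
--     return list(ind.values())
--
-- def landmine(condition_lst,becheck_lst):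
--     """排雷 找出绝对不能点的格子"""
--     non_1_indices = [
--         i for i, v in enumerate(becheck_lst)
--         if v != 1 and (
--             (i > 0 and becheck_lst[i - 1] == 1) or
--             (i < len(becheck_lst) - 1 and becheck_lst[i + 1] == 1))]
--     for idx in non_1_indices:
--         B = temporarily_set(becheck_lst, idx, 1, lambda: is_same_segment(becheck_lst))  # 这里只是个例子
--         if not can_cover(condition_lst,B):
--             becheck_lst[idx] = -1
--
--     return becheck_lst
-- ===== SOURCE B (Python) =====
-- def landmine(condition_lst, becheck_lst):
--     """排雷 找出绝对不能点的格子 (mutates becheck_lst in place, like A)"""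
--     a_desc = sorted(condition_lst, reverse=True)
--     n = len(becheck_lst)
--     ones = [v == 1 for v in becheck_lst]
--
--     def covered(forced):
--         # segment lengths of the grid with cell `forced` treated as safe, one pass
--         lens = []
--         run = 0
--         for i in range(n):
--             if i == forced or ones[i]:
--                 run += 1
--             elif run:
--                 lens.append(run)
--                 run = 0
--         if run:
--             lens.append(run)
--         lens.sort(reverse=True)
--         # greedy matching on two descending lists = pointwise prefix comparison
--         return len(lens) <= len(a_desc) and all(b <= a for a, b in zip(a_desc, lens))
--
--     for i in range(n):
--         if not ones[i] and ((i > 0 and ones[i - 1]) or (i + 1 < n and ones[i + 1])) \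
--                 and not covered(i):
--             becheck_lst[i] = -1
--     return becheck_lst
-- ===== Notes on version B (the rewrite author's own statement) =====
-- stated objective: alternative
-- what changed: B precomputes the ==1 mask once, recomputes segment lengths in a single pass per candidate (instead of A's segments-list-of-endpoints plus dict rebuild), and replaces A's greedy matching with used-flags by a sort followed by a pointwise prefix comparison of the two descending lists.
import Mathlib
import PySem

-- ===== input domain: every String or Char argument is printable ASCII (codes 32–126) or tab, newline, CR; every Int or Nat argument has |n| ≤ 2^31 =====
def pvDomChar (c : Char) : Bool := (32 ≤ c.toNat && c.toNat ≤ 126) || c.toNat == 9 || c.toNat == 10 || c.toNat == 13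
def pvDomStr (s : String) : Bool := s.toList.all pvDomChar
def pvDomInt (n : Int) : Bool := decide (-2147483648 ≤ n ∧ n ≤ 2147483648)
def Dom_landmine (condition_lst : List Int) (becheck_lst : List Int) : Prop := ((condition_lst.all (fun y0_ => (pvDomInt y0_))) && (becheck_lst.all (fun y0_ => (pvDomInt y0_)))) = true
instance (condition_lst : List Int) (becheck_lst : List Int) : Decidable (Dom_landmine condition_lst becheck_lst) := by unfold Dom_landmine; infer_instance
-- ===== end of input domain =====

-- B precomputes the ==1 mask once, rebuilds segment lengths in a single pass per
-- candidate, and replaces A's greedy matching with used-flags by a pointwise prefix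
-- comparison of the two descending sorted lists (alternative algorithm, similar cost).
-- A mutates becheck_lst in place (B performs the same mutation); the equivalence proved
-- here is about the returned list.

-- ===== PORT A =====
-- inner 'for i, a in enumerate(A_sorted): if not used[i] and a >= b' scan of can_cover
def ccFind (b : Int) : List (Int × Bool) → Option Nat
  | [] => none
  | (a, u) :: rest => if !u && decide (b ≤ a) then some 0 else (ccFind b rest).map (· + 1)

-- outer 'for b in B_sorted' loop of can_cover, carrying the 'used' list
def ccLoop (aSorted : List Int) : List Bool → List Int → Bool
  | _, [] => true
  | used, b :: bs =>
    match ccFind b (aSorted.zip used) with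
    | some i => ccLoop aSorted (used.set i true) bs
    | none => false

def canCover (A B : List Int) : Bool :=
  let aSorted := PySem.List.sorted A (fun x => x) true
  let bSorted := PySem.List.sorted B (fun x => x) true
  ccLoop aSorted (List.replicate aSorted.length false) bSorted

-- one step of is_same_segment's main loop; state = (segments, in_segment, start)
-- (start is Option Int for Python's None; it is only read while in_segment, so .getD 0 is exact)
def segStep (st : List (Int × Int) × Bool × Option Int) (p : Int × Int) :
    List (Int × Int) × Bool × Option Int :=
  if p.2 == 1 then
    if !st.2.1 then (st.1, true, some p.1) else st
  else
    if st.2.1 then (st.1 ++ [(st.2.2.getD 0, p.1 - 1)], false, st.2.2) else st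

def isSameSegment (lst : List Int) : PySem.Dict Int Int :=
  let st := (PySem.List.enumerate lst 0).foldl segStep ([], false, none)
  let segments := if st.2.1 then st.1 ++ [(st.2.2.getD 0, (lst.length : Int) - 1)] else st.1
  (PySem.List.enumerate segments 1).foldl
    (fun d p => d.insert p.1 (p.2.2 - p.2.1 + 1)) PySem.Dict.empty

def landmine (condition_lst : List Int) (becheck_lst : List Int) : List Int :=
  let n : Int := becheck_lst.length
  let non1 := ((PySem.List.enumerate becheck_lst 0).filter (fun p =>
      p.2 != 1 &&
      ((decide (0 < p.1) && (PySem.List.pyGetD becheck_lst (p.1 - 1) 0 == 1)) ||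
       (decide (p.1 < n - 1) && (PySem.List.pyGetD becheck_lst (p.1 + 1) 0 == 1))))).map (·.1)
  non1.foldl (fun lst idx =>
    -- temporarily_set(lst, idx, 1, …): save, set, compute, restore (idx is always in range)
    let original := PySem.List.pyGetD lst idx 0
    let lst1 := PySem.List.pySetD lst idx 1
    let B := (isSameSegment lst1).values
    let lst2 := PySem.List.pySetD lst1 idx original
    if !canCover condition_lst B then PySem.List.pySetD lst2 idx (-1) else lst2)
    becheck_lst

-- ===== PORT B =====
-- segment lengths of the grid with cell `forced` treated as safe, in one pass (Source B's covered loop)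
def segLensB (ones : List Bool) (forced : Int) : List Int :=
  let st := (PySem.List.pyRange 0 (ones.length : Int) 1).foldl
    (fun (st : List Int × Int) i =>
      if (i == forced) || PySem.List.pyGetD ones i false then (st.1, st.2 + 1)
      else if st.2 != 0 then (st.1 ++ [st.2], 0) else st)
    ([], 0)
  if st.2 != 0 then st.1 ++ [st.2] else st.1

def landmine_alt (condition_lst : List Int) (becheck_lst : List Int) : List Int :=
  let aDesc := PySem.List.sorted condition_lst (fun x => x) true
  let n : Int := becheck_lst.length
  let ones := becheck_lst.map (fun v => v == 1)
  (PySem.List.pyRange 0 n 1).foldl (fun lst i =>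
    if !PySem.List.pyGetD ones i false &&
       ((decide (0 < i) && PySem.List.pyGetD ones (i - 1) false) ||
        (decide (i + 1 < n) && PySem.List.pyGetD ones (i + 1) false)) &&
       !(let lens := PySem.List.sorted (segLensB ones i) (fun x => x) true
         decide (lens.length ≤ aDesc.length) && (aDesc.zip lens).all (fun p => decide (p.2 ≤ p.1)))
    then PySem.List.pySetD lst i (-1) else lst) becheck_lst

-- ===== PRECONDITION & SPEC =====
def Spec_landmine (condition_lst : List Int) (becheck_lst : List Int) (out : List Int) : Prop := out = landmine_alt condition_lst becheck_lst
instance (condition_lst : List Int) (becheck_lst : List Int) (out : List Int) : Decidable (Spec_landmine condition_lst becheck_lst out) := by unfold Spec_landmine; infer_instance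

-- ===== CLAIM (what is proved, stated in full; the proofs are below) =====
def Claim_equal_landmine : Prop := ∀ (condition_lst : List Int) (becheck_lst : List Int), Dom_landmine condition_lst becheck_lst → Spec_landmine condition_lst becheck_lst (landmine condition_lst becheck_lst)


-- ===== LEMMAS AND PROOFS =====

-- mask-level segment-length scan (the common core of both ports' segment computations)
def maskStep (st : List Int × Int) (b : Bool) : List Int × Int :=
  if b then (st.1, st.2 + 1) else if st.2 != 0 then (st.1 ++ [st.2], 0) else st

def maskFin (st : List Int × Int) : List Int := if st.2 != 0 then st.1 ++ [st.2] else st.1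

def maskSegs (m : List Bool) : List Int := maskFin (m.foldl maskStep ([], 0))

-- structural form of B's prefix comparison
def covers : List Int → List Int → Bool
  | _, [] => true
  | [], _ :: _ => false
  | a :: as, b :: bs => decide (b ≤ a) && covers as bs

-- the step functions of the two main loops, named for the proofs
def stepA (cond : List Int) (lst : List Int) (idx : Int) : List Int :=
  let original := PySem.List.pyGetD lst idx 0
  let lst1 := PySem.List.pySetD lst idx 1
  let B := (isSameSegment lst1).values
  let lst2 := PySem.List.pySetD lst1 idx original
  if !canCover cond B then PySem.List.pySetD lst2 idx (-1) else lst2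

def candQ (bec : List Int) (p : Int × Int) : Bool :=
  p.2 != 1 &&
  ((decide (0 < p.1) && (PySem.List.pyGetD bec (p.1 - 1) 0 == 1)) ||
   (decide (p.1 < (bec.length : Int) - 1) && (PySem.List.pyGetD bec (p.1 + 1) 0 == 1)))

def stepB (cond : List Int) (bec : List Int) (lst : List Int) (i : Int) : List Int :=
  let aDesc := PySem.List.sorted cond (fun x => x) true
  let n : Int := bec.length
  let ones := bec.map (fun v => v == 1)
  if !PySem.List.pyGetD ones i false &&
     ((decide (0 < i) && PySem.List.pyGetD ones (i - 1) false) ||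
      (decide (i + 1 < n) && PySem.List.pyGetD ones (i + 1) false)) &&
     !(let lens := PySem.List.sorted (segLensB ones i) (fun x => x) true
       decide (lens.length ≤ aDesc.length) && (aDesc.zip lens).all (fun p => decide (p.2 ≤ p.1)))
  then PySem.List.pySetD lst i (-1) else lst

lemma landmine_eq_fold (cond bec : List Int) :
    landmine cond bec =
      (((PySem.List.enumerate bec 0).filter (candQ bec)).map (·.1)).foldl (stepA cond) bec := by
  rfl

lemma landmine_alt_eq_fold (cond bec : List Int) :
    landmine_alt cond bec =
      (PySem.List.pyRange 0 (bec.length : Int) 1).foldl (stepB cond bec) bec := by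
  rfl

-- ---- dict built from fresh increasing keys: values in insertion order ----
lemma dictValues (segs : List (Int × Int)) : ∀ (i : Int) (d : PySem.Dict Int Int),
    (∀ k ∈ d.keys, k < i) →
    ((PySem.List.enumerate segs i).foldl
        (fun d p => d.insert p.1 (p.2.2 - p.2.1 + 1)) d).values
      = d.values ++ segs.map (fun q => q.2 - q.1 + 1) := by
  induction segs with
  | nil => intro i d h; simp [PySem.List.enumerate_nil]
  | cons x xs ih =>
    intro i d h
    rw [PySem.List.enumerate_cons]
    simp only [List.foldl_cons]
    have hc : d.contains i = false := by
      by_contra hc'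
      have hm : i ∈ d.keys := (PySem.Dict.contains_iff_mem_keys d i).1 (by
        cases hcc : d.contains i with
        | true => rfl
        | false => exact absurd hcc hc')
      exact absurd (h i hm) (by omega)
    rw [ih (i + 1) _ ?_]
    · rw [PySem.Dict.values, PySem.Dict.items_insert_of_not_contains _ _ hc]
      simp [PySem.Dict.values]
    · intro k hk
      rw [PySem.Dict.keys_insert_of_not_contains _ _ hc] at hk
      rcases List.mem_append.1 hk with hk | hk
      · have := h k hk; omega
      · simp at hk; omega

-- ---- A's segment scan equals the mask scan ----
lemma segAux (lst : List Int) : ∀ (idx : Int) (segs : List (Int × Int)) (inSeg : Bool)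
    (start : Option Int) (run : Int),
    (inSeg = true → ∃ s, start = some s ∧ run = idx - s ∧ 1 ≤ run) →
    (inSeg = false → run = 0) →
    (let st := (PySem.List.enumerate lst idx).foldl segStep (segs, inSeg, start)
     (if st.2.1 then st.1 ++ [(st.2.2.getD 0, idx + (lst.length : Int) - 1)] else st.1).map
        (fun q => q.2 - q.1 + 1))
      = maskFin ((lst.map (fun v => v == 1)).foldl maskStep
          (segs.map (fun q => q.2 - q.1 + 1), run)) := by
  induction lst with
  | nil =>
    intro idx segs inSeg start run h1 h2
    cases inSeg with
    | false =>
      simp only [PySem.List.enumerate_nil, List.foldl_nil, List.map_nil, maskFin, h2 rfl]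
      simp
    | true =>
      obtain ⟨s, hs, hr, hge⟩ := h1 rfl
      subst hs
      simp only [PySem.List.enumerate_nil, List.foldl_nil, List.map_nil, maskFin]
      have hne : (run != 0) = true := by simp; omega
      simp only [hne, if_true, List.map_append, List.map_cons, List.map_nil,
        Option.getD_some, List.length_nil]
      congr 2
      simp; omega
  | cons x xs ih =>
    intro idx segs inSeg start run h1 h2
    rw [PySem.List.enumerate_cons]
    simp only [List.foldl_cons, List.map_cons]
    have hE : idx + ((x :: xs).length : Int) - 1 = idx + 1 + (xs.length : Int) - 1 := by
      simp [List.length_cons]; ring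
    by_cases hx : (x == 1) = true
    · cases inSeg with
      | false =>
        have hr0 := h2 rfl; subst hr0
        simp only [segStep, maskStep, hx, Bool.not_false, if_true]
        rw [show idx + ((x :: xs).length : Int) - 1 = idx + 1 + (xs.length : Int) - 1 from hE]
        exact ih (idx + 1) segs true (some idx) (0 + 1)
          (fun _ => ⟨idx, rfl, by omega, by omega⟩) (by simp)
      | true =>
        obtain ⟨s, hs, hr, hge⟩ := h1 rfl
        simp only [segStep, maskStep, hx, Bool.not_true, if_true, if_false, Bool.false_eq_true]
        rw [show idx + ((x :: xs).length : Int) - 1 = idx + 1 + (xs.length : Int) - 1 from hE]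
        exact ih (idx + 1) segs true start (run + 1)
          (fun _ => ⟨s, hs, by omega, by omega⟩) (by simp)
    · cases inSeg with
      | false =>
        have hr0 := h2 rfl; subst hr0
        simp only [segStep, maskStep, hx, if_false, Bool.false_eq_true, bne_self_eq_false]
        rw [show idx + ((x :: xs).length : Int) - 1 = idx + 1 + (xs.length : Int) - 1 from hE]
        exact ih (idx + 1) segs false start 0 (by simp) (fun _ => rfl)
      | true =>
        obtain ⟨s, hs, hr, hge⟩ := h1 rfl
        subst hs
        have hne : (run != 0) = true := by simp; omega
        simp only [segStep, maskStep, hx, if_false, Bool.false_eq_true, hne, if_true,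
          Option.getD_some]
        rw [show idx + ((x :: xs).length : Int) - 1 = idx + 1 + (xs.length : Int) - 1 from hE]
        have hmap : (segs ++ [(s, idx - 1)]).map (fun q => q.2 - q.1 + 1)
            = segs.map (fun q => q.2 - q.1 + 1) ++ [run] := by
          rw [List.map_append]; congr 1; simp; omega
        rw [← hmap]
        exact ih (idx + 1) (segs ++ [(s, idx - 1)]) false (some s) 0 (by simp) (fun _ => rfl)

lemma valuesIsSameSegment (lst : List Int) :
    (isSameSegment lst).values = maskSegs (lst.map (fun v => v == 1)) := by
  have h := segAux lst 0 [] false none 0 (by simp) (fun _ => rfl)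
  simp only [zero_add, List.map_nil] at h
  unfold isSameSegment
  rw [dictValues _ 1 PySem.Dict.empty (by simp [PySem.Dict.empty, PySem.Dict.keys])]
  simp only [PySem.Dict.empty, PySem.Dict.values, List.map_nil, List.nil_append]
  exact h.trans (by rw [maskSegs])

-- ---- B's forced one-pass equals the mask scan on the updated mask ----
lemma segLensB_eq (ones : List Bool) (i : Int) (h0 : 0 ≤ i) (h1 : i < (ones.length : Int)) :
    segLensB ones i = maskSegs (ones.set i.toNat true) := by
  unfold segLensB maskSegs
  have hlen : (ones.length : Int) = ((ones.set i.toNat true).length : Int) := by simp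
  rw [hlen]
  rw [PySem.List.foldl_congr_mem _ _
    (fun st j => maskStep st (PySem.List.pyGetD (ones.set i.toNat true) j false)) _ ?_]
  · rw [PySem.List.foldl_pyRange_zero_pyGetD' (ones.set i.toNat true) false maskStep ([], 0)]
    rfl
  · intro acc j hj
    have hj' := PySem.List.mem_pyRange_one.1 hj
    have hmem : PySem.List.pyGetD (ones.set i.toNat true) j false
        = ((j == i) || PySem.List.pyGetD ones j false) := by
      rw [PySem.List.pyGetD_of_nonneg _ _ hj'.1, PySem.List.pyGetD_of_nonneg _ _ hj'.1]
      rcases eq_or_ne j i with h | hne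
      · subst h
        have ht : j.toNat < ones.length := by omega
        simp [List.getD, ht]
      · have hne' : i.toNat ≠ j.toNat := by omega
        have hb : (j == i) = false := by simp [hne]
        simp [hb, List.getD, List.getElem?_set_ne hne']
    simp only [maskStep, hmem]
  

-- ---- greedy matching on two descending lists = prefix comparison ----
lemma ccFind_none (b : Int) : ∀ (As : List Int), (∀ a ∈ As, a < b) →
    ccFind b (As.zip (List.replicate As.length false)) = none := by
  intro As
  induction As with
  | nil => intro _; rfl
  | cons a rest ih =>
    intro h
    simp only [List.length_cons, List.replicate_succ, List.zip_cons_cons, ccFind]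
    have : ¬ b ≤ a := by have := h a (by simp); omega
    simp [this, ih (fun x hx => h x (by simp [hx]))]

lemma ccFind_skip (b : Int) : ∀ (As1 : List Int) (rest : List (Int × Bool)),
    ccFind b (As1.zip (List.replicate As1.length true) ++ rest)
      = (ccFind b rest).map (· + As1.length) := by
  intro As1
  induction As1 with
  | nil => intro rest; simp
  | cons a as ih =>
    intro rest
    simp only [List.length_cons, List.replicate_succ, List.zip_cons_cons, List.cons_append, ccFind]
    simp only [Bool.not_true, Bool.false_and, Bool.false_eq_true, if_false, ih]
    cases ccFind b rest with
    | none => simp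
    | some k => simp; omega

lemma set_trues (k m : Nat) :
    (List.replicate k true ++ false :: List.replicate m false).set k true
      = List.replicate (k + 1) true ++ List.replicate m false := by
  induction k with
  | zero => simp [List.replicate_succ]
  | succ k ih => simp only [List.replicate_succ, List.cons_append, List.set_cons_succ, ih]

lemma ccAux : ∀ (Bs As1 As2 : List Int), As2.Pairwise (fun a b => b ≤ a) →
    ccLoop (As1 ++ As2)
        (List.replicate As1.length true ++ List.replicate As2.length false) Bs
      = covers As2 Bs := by
  intro Bs
  induction Bs with
  | nil => intro As1 As2 _; cases As2 <;> rfl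
  | cons b bs ih =>
    intro As1 As2 hp
    rw [ccLoop]
    rw [List.zip_append (by simp)]
    rw [ccFind_skip]
    cases As2 with
    | nil => rfl
    | cons a rest =>
      simp only [List.length_cons, List.replicate_succ, List.zip_cons_cons, ccFind,
        Bool.not_false, Bool.true_and]
      by_cases hba : b ≤ a
      · simp only [hba, decide_true, if_true, Option.map_some]
        have hset : (List.replicate As1.length true ++
            (false :: List.replicate rest.length false)).set (0 + As1.length) true
            = List.replicate (As1 ++ [a]).length true ++ List.replicate rest.length false := by
          rw [Nat.zero_add, set_trues]
          simp
        rw [hset]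
        have hres : As1 ++ a :: rest = (As1 ++ [a]) ++ rest := by simp
        rw [hres]
        rw [ih (As1 ++ [a]) rest (List.Pairwise.sublist (List.sublist_cons_self a rest) hp)]
        simp [covers, hba]
      · simp only [hba, decide_false, if_false, Bool.false_eq_true]
        have hnone : ccFind b (rest.zip (List.replicate rest.length false)) = none := by
          apply ccFind_none
          intro x hx
          have := (List.pairwise_cons.1 hp).1 x hx
          omega
        rw [hnone]
        simp [covers, hba]

lemma covers_zip : ∀ (As Bs : List Int),
    covers As Bs
      = (decide (Bs.length ≤ As.length) && (As.zip Bs).all (fun p => decide (p.2 ≤ p.1))) := by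
  intro As
  induction As with
  | nil => intro Bs; cases Bs <;> simp [covers]
  | cons a as ih =>
    intro Bs
    cases Bs with
    | nil => simp [covers]
    | cons b bs =>
      simp only [covers, List.zip_cons_cons, List.all_cons, List.length_cons, ih]
      by_cases h : b ≤ a
      · simp [h]
      · simp [h]

lemma canCover_eq (A B : List Int) :
    canCover A B =
      (let aDesc := PySem.List.sorted A (fun x => x) true
       let bs := PySem.List.sorted B (fun x => x) true
       decide (bs.length ≤ aDesc.length) && (aDesc.zip bs).all (fun p => decide (p.2 ≤ p.1))) := by
  unfold canCover
  have h := ccAux (PySem.List.sorted B (fun x => x) true) []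
    (PySem.List.sorted A (fun x => x) true)
    (PySem.List.sorted_pairwise_rev A (fun x => x))
  simp only [List.nil_append, List.length_nil, List.replicate_zero] at h
  rw [h, covers_zip]

-- ---- small list facts ----
lemma setRestore (lst : List Int) (i : Int) (h0 : 0 ≤ i) (h1 : i.toNat < lst.length) :
    PySem.List.pySetD (PySem.List.pySetD lst i 1) i (PySem.List.pyGetD lst i 0) = lst := by
  rw [PySem.List.pySetD_of_nonneg _ _ h0, PySem.List.pySetD_of_nonneg _ _ h0,
    PySem.List.pyGetD_of_nonneg _ _ h0, List.set_set]
  rw [List.getD_eq_getElem lst 0 h1]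
  exact List.set_getElem_self h1

lemma set_false_self (m : List Bool) (k : Nat) (h : m.getD k false = false) :
    m.set k false = m := by
  ext1 j
  rcases eq_or_ne k j with rfl | hne
  · rcases Nat.lt_or_ge k m.length with hlt | hge
    · rw [List.getElem?_set_self hlt]
      rw [List.getD_eq_getElem m false hlt] at h
      simp [List.getElem?_eq_getElem hlt, h]
    · rw [List.set_eq_of_length_le (by omega)]
  · rw [List.getElem?_set_ne hne]

lemma stepB_cases (cond bec lst : List Int) (i : Int) :
    stepB cond bec lst i = lst ∨
      (stepB cond bec lst i = PySem.List.pySetD lst i (-1) ∧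
        PySem.List.pyGetD (bec.map (fun v => v == 1)) i false = false) := by
  simp only [stepB]
  split
  · rename_i h
    right
    refine ⟨rfl, ?_⟩
    rw [Bool.and_eq_true] at h
    have h1 := h.1
    simp at h1
    exact h1.1
  · left; rfl

-- ---- the per-candidate step of A equals B's step (given the mask invariants) ----
lemma step_eq (cond bec lst : List Int) (i : Int)
    (hlen : lst.length = bec.length)
    (hmask : lst.map (fun v => v == 1) = bec.map (fun v => v == 1))
    (h0 : 0 ≤ i) (h1 : i < (bec.length : Int)) :
    (if candQ bec (i, PySem.List.pyGetD bec i 0) then stepA cond lst i else lst)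
      = stepB cond bec lst i := by
  have hones : ∀ j : Int, PySem.List.pyGetD (bec.map (fun v => v == 1)) j false
      = (PySem.List.pyGetD bec j 0 == 1) := by
    intro j
    have h := PySem.List.pyGetD_map (fun v => v == 1) bec j 0
    simpa using h
  have hdec : decide (i < (bec.length : Int) - 1) = decide (i + 1 < (bec.length : Int)) := by
    simp only [decide_eq_decide]; omega
  have hcand : candQ bec (i, PySem.List.pyGetD bec i 0)
      = (!PySem.List.pyGetD (bec.map (fun v => v == 1)) i false &&
         ((decide (0 < i) && PySem.List.pyGetD (bec.map (fun v => v == 1)) (i - 1) false) ||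
          (decide (i + 1 < (bec.length : Int)) && PySem.List.pyGetD (bec.map (fun v => v == 1)) (i + 1) false))) := by
    simp only [candQ, hones, hdec]
    rfl
  have hB : (isSameSegment (PySem.List.pySetD lst i 1)).values
      = segLensB (bec.map (fun v => v == 1)) i := by
    rw [valuesIsSameSegment]
    rw [PySem.List.pySetD_of_nonneg _ _ h0, List.map_set]
    have h11 : ((1 : Int) == 1) = true := by decide
    rw [h11, hmask]
    rw [← segLensB_eq _ i h0 (by simpa using h1)]
  have hrest : PySem.List.pySetD (PySem.List.pySetD lst i 1) i (PySem.List.pyGetD lst i 0)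
      = lst := setRestore lst i h0 (by omega)
  rw [hcand]
  simp only [stepB]
  cases hC : (!PySem.List.pyGetD (bec.map (fun v => v == 1)) i false &&
         ((decide (0 < i) && PySem.List.pyGetD (bec.map (fun v => v == 1)) (i - 1) false) ||
          (decide (i + 1 < (bec.length : Int)) && PySem.List.pyGetD (bec.map (fun v => v == 1)) (i + 1) false))) with
  | false => simp
  | true =>
    simp only [Bool.true_and, if_true]
    simp only [stepA, hB, hrest, canCover_eq]

lemma loopAux (cond bec : List Int) : ∀ (is : List Int) (lst : List Int),
    lst.length = bec.length →
    lst.map (fun v => v == 1) = bec.map (fun v => v == 1) →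
    (∀ i ∈ is, 0 ≤ i ∧ i < (bec.length : Int)) →
    is.foldl (fun l i => if candQ bec (i, PySem.List.pyGetD bec i 0) then stepA cond l i else l) lst
      = is.foldl (stepB cond bec) lst := by
  intro is
  induction is with
  | nil => intro lst _ _ _; rfl
  | cons i rest ih =>
    intro lst hlen hmask hmem
    obtain ⟨h0, h1⟩ := hmem i (by simp)
    simp only [List.foldl_cons]
    rw [step_eq cond bec lst i hlen hmask h0 h1]
    rcases stepB_cases cond bec lst i with he | ⟨he, hz⟩
    · rw [he]; exact ih lst hlen hmask (fun j hj => hmem j (by simp [hj]))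
    · rw [he]
      have hlen' : (PySem.List.pySetD lst i (-1)).length = bec.length := by
        rw [PySem.List.pySetD_of_nonneg _ _ h0, List.length_set]; exact hlen
      have hmask' : (PySem.List.pySetD lst i (-1)).map (fun v => v == 1)
          = bec.map (fun v => v == 1) := by
        rw [PySem.List.pySetD_of_nonneg _ _ h0, List.map_set]
        have hm1 : (((-1) : Int) == 1) = false := by decide
        rw [hm1, hmask]
        apply set_false_self
        rw [PySem.List.pyGetD_of_nonneg _ _ h0] at hz
        exact hz
      exact ih _ hlen' hmask' (fun j hj => hmem j (by simp [hj]))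

-- ===== VERDICT (by name: the statement is the Claim_ definition above) =====
theorem landmine_spec : Claim_equal_landmine := by
  unfold Claim_equal_landmine
  intro cond bec _
  unfold Spec_landmine
  rw [landmine_eq_fold, landmine_alt_eq_fold]
  rw [PySem.List.enumerate_eq_map_pyRange bec 0]
  rw [List.filter_map, List.map_map]
  have hid : ((·.1) ∘ (fun j => (j, PySem.List.pyGetD bec j 0)) : Int → Int) = id := rfl
  rw [hid, List.map_id]
  rw [← PySem.List.foldl_if_eq_foldl_filter (candQ bec ∘ fun j => (j, PySem.List.pyGetD bec j 0))
    (stepA cond)]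
  have hlen : PySem.List.len bec = (bec.length : Int) := by simp
  rw [hlen]
  exact loopAux cond bec _ bec rfl rfl
    (fun i hi => by
      have := PySem.List.mem_pyRange_one.1 hi
      exact ⟨this.1, this.2⟩)
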